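-- pv_equiv track=rewrite | github.com/yahia-soliman/alx-interview | 0x0A-primegame/0-prime_game.py | playMaria
-- ===== SOURCE A (Python) =====
-- def playMaria(n):
--     """Play a round of the game
--
--     n: positive number
--     """
--     won = False
--     integers = set(range(1, n + 1))
--     for prime in primeGenerator(n):
--         won = not won
--         for i in list(integers):
--             if i % prime == 0:
--                 integers.remove(i)
--     return won
--
-- def primeGenerator(maxValue):
--     primes = set()
--     for n in range(2, maxValue):
--         for prime in primes:
--             if n % prime == 0:
--                 break
--         else:
--             primes.add(n)
--             yield n
-- ===== SOURCE B (Python) =====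
-- def playMaria(n):
--     """Play a round of the game
--
--     n: positive number
--     """
--     if n < 2:
--         return False
--     sieve = [True] * n
--     sieve[0] = False
--     sieve[1] = False
--     i = 2
--     while i * i < n:
--         if sieve[i]:
--             j = i * i
--             while j < n:
--                 sieve[j] = False
--                 j += i
--         i += 1
--     won = False
--     for k in range(2, n):
--         if sieve[k]:
--             won = not won
--     return won
-- ===== Notes on version B (the rewrite author's own statement) =====
-- stated objective: faster
-- what changed: A counts the parity of primes below n by trial-dividing every candidate against all primes found so far while also deleting multiples from a shrinking Python set; B computes the same parity with a Sieve of Eratosthenes over a boolean table and one final counting pass.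
import Mathlib
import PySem

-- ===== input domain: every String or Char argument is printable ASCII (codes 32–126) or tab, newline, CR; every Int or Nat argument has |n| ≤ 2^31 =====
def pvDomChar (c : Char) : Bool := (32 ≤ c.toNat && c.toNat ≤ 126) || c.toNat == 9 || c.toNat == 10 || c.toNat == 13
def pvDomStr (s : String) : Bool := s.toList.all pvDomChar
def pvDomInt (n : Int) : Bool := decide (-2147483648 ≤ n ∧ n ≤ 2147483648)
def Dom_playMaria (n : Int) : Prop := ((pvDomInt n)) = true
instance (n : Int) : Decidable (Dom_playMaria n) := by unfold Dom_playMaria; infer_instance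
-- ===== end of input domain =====

-- B replaces A's "trial-divide every number by all primes found so far (and cross survivors
-- out of a shrinking set)" with a sieve of Eratosthenes over a boolean table; the result —
-- the parity of the number of primes below n — is unchanged (measured faster by the check).

-- ===== PORT A =====
-- One step of A's outer loop: k is the next value yielded by primeGenerator (it is yielded
-- iff no already-found prime divides it); then `won` flips and multiples of k are removed
-- from `integers`.  Python's set-iteration order is not modelled, but both set traversals
-- here are order-independent: `any` (the for/else-break) and removing all divisible elements.
-- `set.remove(i)` never raises here (each snapshot element occurs once), so `.getD s` is a
-- pure totality guard.
def pvAStep (st : Bool × List Int × List Int) (k : Int) : Bool × List Int × List Int :=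
  match st with
  | (won, primes, ints) =>
    if primes.any (fun p => PySem.Int.mod k p == 0) then (won, primes, ints)
    else (!won, PySem.Set.add primes k,
      List.foldl (fun s i => if PySem.Int.mod i k == 0 then (PySem.Set.remove? s i).getD s else s) ints ints)

def playMaria (n : Int) : Bool :=
  (List.foldl pvAStep (false, PySem.Set.empty, PySem.Set.ofList (PySem.List.pyRange 1 (n + 1)))
    (PySem.List.pyRange 2 n)).1

-- ===== PORT B =====
-- inner while of Source B: sieve[j] = False; j += i
def pvMark (s : List Bool) (j i m : Nat) : List Bool :=
  if _h : j < m then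
    if _hi : i = 0 then s   -- totality guard only: Source B always has i ≥ 2 here
    else pvMark (s.set j false) (j + i) i m
  else s
termination_by m - j
decreasing_by omega

-- outer while of Source B: while i * i < n: if sieve[i]: mark; i += 1
def pvOuter (s : List Bool) (i m : Nat) : List Bool :=
  if _h : i * i < m then
    pvOuter (if s.getD i false then pvMark s (i * i) i m else s) (i + 1) m
  else s
termination_by m - i
decreasing_by
  have h2 : i ≤ i * i := by nlinarith
  omega

def playMaria_alt (n : Int) : Bool :=
  if n < 2 then false
  else
    let m := n.toNat
    let sieve := pvOuter (((List.replicate m true).set 0 false).set 1 false) 2 m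
    List.foldl (fun won k => if PySem.List.pyGetD sieve k false then !won else won) false
      (PySem.List.pyRange 2 n)

-- ===== PRECONDITION & SPEC =====
def Spec_playMaria (n : Int) (out : Bool) : Prop := out = playMaria_alt n
instance (n : Int) (out : Bool) : Decidable (Spec_playMaria n out) := by unfold Spec_playMaria; infer_instance

-- ===== CLAIM (what is proved, stated in full; the proofs are below) =====
def Claim_equal_playMaria : Prop := ∀ (n : Int), Dom_playMaria n → Spec_playMaria n (playMaria n)

-- ===== LEMMAS AND PROOFS =====

-- Common reference: parity of the number of primes in [2, 2+t)
def pvRefN (t : Nat) : Bool :=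
  List.foldl (fun won k => if Nat.Prime (2 + k) then !won else won) false (List.range t)

-- K ≥ 2 is composite iff some prime below it divides it (A's trial division is sound)
lemma pvSmallPrimeFactor (K : Nat) (hK : 2 ≤ K) :
    (∃ P : Nat, P.Prime ∧ P < K ∧ P ∣ K) ↔ ¬ K.Prime := by
  constructor
  · rintro ⟨P, hP, hPK, hdvd⟩ hprime
    rcases hprime.eq_one_or_self_of_dvd P hdvd with h | h
    · exact absurd h (by have := hP.two_le; omega)
    · omega
  · intro hP
    refine ⟨K.minFac, Nat.minFac_prime (by omega), ?_, Nat.minFac_dvd K⟩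
    have hle : K.minFac ≤ K := Nat.minFac_le (by omega)
    rcases Nat.lt_or_ge K.minFac K with h | h
    · exact h
    · exfalso
      have : K.minFac = K := by omega
      exact hP (this ▸ Nat.minFac_prime (by omega : K ≠ 1))

-- K ≥ 2 is composite iff it has a divisor d with 2 ≤ d and d*d ≤ K (B's sieve bound is sound)
lemma pvSqrtFactor (K : Nat) (hK : 2 ≤ K) :
    (∃ d, 2 ≤ d ∧ d ∣ K ∧ d * d ≤ K) ↔ ¬ K.Prime := by
  constructor
  · rintro ⟨d, hd2, hdvd, hdd⟩ hP
    rcases (Nat.Prime.eq_one_or_self_of_dvd hP d hdvd) with h | h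
    · omega
    · subst h; nlinarith
  · intro hP
    refine ⟨K.minFac, ?_, Nat.minFac_dvd K, ?_⟩
    · exact (Nat.minFac_prime (by omega : K ≠ 1)).two_le
    · have := Nat.minFac_sq_le_self (by omega : 0 < K) hP
      nlinarith [this]

lemma pvPrimeChar (j : Nat) :
    (2 ≤ j ∧ ∀ d, 2 ≤ d → d ∣ j → ¬ d * d ≤ j) ↔ j.Prime := by
  constructor
  · rintro ⟨h2, hall⟩
    by_contra hP
    obtain ⟨d, hd2, hdvd, hdd⟩ := (pvSqrtFactor j h2).mpr hP
    exact hall d hd2 hdvd hdd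
  · intro hP
    exact ⟨hP.two_le, fun d hd2 hdvd hdd => (pvSqrtFactor j hP.two_le).mp ⟨d, hd2, hdvd, hdd⟩ hP⟩

-- ===== A-side: loop invariant =====
lemma pvAInv (t : Nat) (ints0 : List Int) :
    (List.foldl pvAStep (false, ([] : List Int), ints0)
        (List.map (fun k : Nat => (2 : Int) + k) (List.range t))).1 = pvRefN t ∧
    (∀ p : Int, p ∈ (List.foldl pvAStep (false, ([] : List Int), ints0)
        (List.map (fun k : Nat => (2 : Int) + k) (List.range t))).2.1 ↔
      2 ≤ p ∧ p < 2 + (t : Int) ∧ Nat.Prime p.toNat) := by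
  induction t with
  | zero => simp [pvRefN]; omega
  | succ t ih =>
    rw [List.range_succ, List.map_append, List.foldl_append]
    obtain ⟨ihw, ihp⟩ := ih
    set st := List.foldl pvAStep (false, ([] : List Int), ints0)
        (List.map (fun k : Nat => (2 : Int) + k) (List.range t)) with hst
    obtain ⟨won, primes, ints⟩ := st
    simp only [List.foldl_cons, List.foldl_nil, List.map_cons, List.map_nil]
    simp only at ihw ihp
    have hcond : (primes.any (fun p => PySem.Int.mod ((2:Int) + t) p == 0) = true)
        ↔ ¬ Nat.Prime (2 + t) := by
      rw [List.any_eq_true]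
      rw [← pvSmallPrimeFactor (2 + t) (by omega)]
      constructor
      · rintro ⟨p, hp, hdvd⟩
        rw [beq_iff_eq, PySem.Int.mod_eq_zero_iff_dvd] at hdvd
        obtain ⟨h2, hlt, hprime⟩ := (ihp p).mp hp
        refine ⟨p.toNat, hprime, by omega, ?_⟩
        have : ((p.toNat : Int)) ∣ ((2 + t : Nat) : Int) := by
          rw [Int.toNat_of_nonneg (by omega)]
          convert hdvd using 1
        exact_mod_cast this
      · rintro ⟨P, hP, hPK, hdvd⟩
        refine ⟨(P : Int), ?_, ?_⟩
        · rw [ihp]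
          exact ⟨by exact_mod_cast hP.two_le, by exact_mod_cast hPK, by simpa using hP⟩
        · rw [beq_iff_eq, PySem.Int.mod_eq_zero_iff_dvd]
          have : ((P : Int)) ∣ ((2 + t : Nat) : Int) := Int.natCast_dvd_natCast.mpr hdvd
          convert this using 1
    simp only [pvAStep]
    by_cases hp : Nat.Prime (2 + t)
    · rw [if_neg (by simp only [hcond]; exact fun h => h hp)]
      constructor
      · simp only [ihw, pvRefN, List.range_succ, List.foldl_append, List.foldl_cons,
          List.foldl_nil, if_pos hp]
      · intro p
        rw [PySem.Set.mem_add, ihp]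
        constructor
        · rintro (⟨h1, h2, h3⟩ | rfl)
          · exact ⟨h1, by omega, h3⟩
          · exact ⟨by omega, by omega, by
              have : ((2:Int) + t).toNat = 2 + t := by omega
              rw [this]; exact hp⟩
        · rintro ⟨h1, h2, h3⟩
          by_cases hpe : p = 2 + (t : Int)
          · right; exact hpe
          · left; exact ⟨h1, by omega, h3⟩
    · rw [if_pos (hcond.mpr hp)]
      constructor
      · simp only [ihw, pvRefN, List.range_succ, List.foldl_append, List.foldl_cons,
          List.foldl_nil, if_neg hp]
      · intro p
        rw [ihp]
        constructor
        · rintro ⟨h1, h2, h3⟩; exact ⟨h1, by omega, h3⟩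
        · rintro ⟨h1, h2, h3⟩
          refine ⟨h1, ?_, h3⟩
          by_cases hpe : p = 2 + (t : Int)
          · exfalso
            apply hp
            have : p.toNat = 2 + t := by omega
            rw [← this]; exact h3
          · omega

lemma pvA_eq (n : Int) : playMaria n = pvRefN (n - 2).toNat := by
  unfold playMaria
  rw [PySem.List.pyRange_one 2 n]
  exact (pvAInv (n - 2).toNat (PySem.Set.ofList (PySem.List.pyRange 1 (n + 1)))).1

-- ===== B-side: sieve correctness =====
lemma pvSetGetD (s : List Bool) (j x : Nat) :
    (s.set j false).getD x false = if j = x ∧ j < s.length then false else s.getD x false := by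
  simp only [List.getD_eq_getElem?_getD, List.getElem?_set]
  split_ifs with h1 h2 <;> simp_all

lemma pvMark_length (s : List Bool) (j i m : Nat) : (pvMark s j i m).length = s.length := by
  fun_induction pvMark <;> simp_all

lemma pvMark_getD (s : List Bool) (j i m : Nat) (hi : 0 < i) (hj : i ∣ j)
    (hm : m ≤ s.length) (x : Nat) :
    (pvMark s j i m).getD x false
      = if j ≤ x ∧ x < m ∧ i ∣ x then false else s.getD x false := by
  fun_induction pvMark with
  | case1 s j hlt hi0 => omega
  | case2 s j hlt hi0 ih =>
    rw [ih (hj.add (dvd_refl i)) (by simpa using hm), pvSetGetD]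
    have hjx : j + i ≤ x ∧ i ∣ x ↔ j ≤ x ∧ j ≠ x ∧ i ∣ x := by
      constructor
      · rintro ⟨h1, h2⟩; exact ⟨by omega, by omega, h2⟩
      · rintro ⟨h1, h2, h3⟩
        refine ⟨?_, h3⟩
        obtain ⟨a, ha⟩ := hj; obtain ⟨b, hb⟩ := h3
        subst ha hb
        have : a < b := by
          by_contra hab
          exact h2 (by nlinarith)
        nlinarith
    by_cases hC : j ≤ x ∧ x < m ∧ i ∣ x
    · rcases hC with ⟨c1, c2, c3⟩
      simp only [if_pos (⟨c1, c2, c3⟩ : j ≤ x ∧ x < m ∧ i ∣ x)]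
      by_cases hx : j = x
      · rw [if_neg, if_pos ⟨hx, by omega⟩]
        rintro ⟨hx1, -, -⟩; omega
      · rw [if_pos ⟨(hjx.mpr ⟨c1, hx, c3⟩).1, c2, c3⟩]
    · rw [if_neg hC, if_neg, if_neg]
      · rintro ⟨hx, -⟩; exact hC ⟨by omega, by omega, hx ▸ hj⟩
      · rintro ⟨c1, c2, c3⟩; exact hC ⟨by omega, c2, c3⟩
  | case3 s j hlt =>
    split_ifs with h1 <;> [omega; rfl]

lemma pvOuter_getD (s : List Bool) (i m : Nat) (hs : m ≤ s.length) (hi : 2 ≤ i)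
    (hinv : ∀ j, j < m → (s.getD j false = true ↔
        (2 ≤ j ∧ ∀ d, 2 ≤ d → d < i → d ∣ j → ¬ d * d ≤ j))) :
    ∀ j, j < m → ((pvOuter s i m).getD j false = true ↔
        (2 ≤ j ∧ ∀ d, 2 ≤ d → d ∣ j → ¬ d * d ≤ j)) := by
  fun_induction pvOuter with
  | case1 s i hlt ih =>
    have him : i < m := by nlinarith
    by_cases hsi : s.getD i false = true
    · rw [dif_pos hsi] at ih; rw [if_pos hsi]
      apply ih
      · rw [pvMark_length]; exact hs
      · omega
      · intro j hj
        -- i survived: i has no divisor d < i with d*d ≤ i; mark multiples of i from i*i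
        rw [pvMark_getD s (i*i) i m (by omega) (dvd_mul_left i i) hs j]
        by_cases hMark : i * i ≤ j ∧ j < m ∧ i ∣ j
        · rw [if_pos hMark]
          constructor
          · intro h; simp at h
          · rintro ⟨-, hall⟩
            exact absurd hMark.1 (hall i (by omega) (by omega) hMark.2.2)
        · rw [if_neg hMark, hinv j hj]
          constructor
          · rintro ⟨hj2, hall⟩
            refine ⟨hj2, fun d hd2 hdi hdvd hdd => ?_⟩
            rcases Nat.lt_or_ge d i with h | h
            · exact hall d hd2 h hdvd hdd
            · have hdi' : d = i := by omega
              subst hdi'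
              exact hMark ⟨hdd, hj, hdvd⟩
          · rintro ⟨hj2, hall⟩
            exact ⟨hj2, fun d hd2 hdi hdvd hdd => hall d hd2 (by omega) hdvd hdd⟩
    · rw [dif_neg hsi] at ih; rw [if_neg hsi]
      apply ih hs (by omega)
      intro j hj
      -- i was already marked composite: a new divisor i of j is subsumed by i's own factor
      rw [hinv j hj]
      have hiComp : ¬ (2 ≤ i ∧ ∀ d, 2 ≤ d → d < i → d ∣ i → ¬ d * d ≤ i) := by
        rw [← hinv i him]; simpa using hsi
      push Not at hiComp
      obtain ⟨e, he2, hei, hedvd, hee⟩ := hiComp hi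
      constructor
      · rintro ⟨hj2, hall⟩
        refine ⟨hj2, fun d hd2 hdi hdvd hdd => ?_⟩
        rcases Nat.lt_or_ge d i with h | h
        · exact hall d hd2 h hdvd hdd
        · have hdi' : d = i := by omega
          subst hdi'
          refine hall e he2 hei (hedvd.trans hdvd) ?_
          have : d ≤ j := Nat.le_of_dvd (by omega) hdvd
          nlinarith
      · rintro ⟨hj2, hall⟩
        exact ⟨hj2, fun d hd2 hdi hdvd hdd => hall d hd2 (by omega) hdvd hdd⟩
  | case2 s i hlt =>
    intro j hj
    rw [hinv j hj]
    constructor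
    · rintro ⟨hj2, hall⟩
      refine ⟨hj2, fun d hd2 hdvd hdd => ?_⟩
      have hdi : d < i := by nlinarith
      exact hall d hd2 hdi hdvd hdd
    · rintro ⟨hj2, hall⟩
      exact ⟨hj2, fun d hd2 _ hdvd hdd => hall d hd2 hdvd hdd⟩

lemma pvB_eq (n : Int) : playMaria_alt n = pvRefN (n - 2).toNat := by
  by_cases hn : n < 2
  · rw [playMaria_alt, if_pos hn]
    have : (n - 2).toNat = 0 := by omega
    rw [this, pvRefN]
    simp
  · rw [playMaria_alt, if_neg hn]
    have hm2 : 2 ≤ n.toNat := by omega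
    set m := n.toNat with hmdef
    set s0 := ((List.replicate m true).set 0 false).set 1 false with hs0
    have hs0len : s0.length = m := by simp [hs0]
    have hinv0 : ∀ j, j < m → (s0.getD j false = true ↔
        (2 ≤ j ∧ ∀ d, 2 ≤ d → d < 2 → d ∣ j → ¬ d * d ≤ j)) := by
      intro j hj
      rw [hs0, pvSetGetD, pvSetGetD]
      by_cases h1 : j = 1
      · rw [if_pos ⟨h1.symm, by simp; omega⟩]
        simp [h1]
      · rw [if_neg (by simp; omega)]
        by_cases h0 : j = 0
        · rw [if_pos ⟨h0.symm, by simp; omega⟩]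
          simp [h0]
        · rw [if_neg (by simp; omega), List.getD_replicate _ hj]
          simp only [true_iff]
          exact ⟨by omega, fun d hd2 hd2' _ _ => by omega⟩
    have hSieve := pvOuter_getD s0 2 m (by omega) (by omega) hinv0
    apply PySem.List.foldl_congr_mem _ _
      (fun won (k : Int) => if Nat.Prime k.toNat then !won else won) false ?_ |>.trans ?_
    · intro acc k hk
      rw [PySem.List.mem_pyRange_one] at hk
      have hkm : k.toNat < m := by omega
      rw [PySem.List.pyGetD_of_nonneg _ _ (by omega)]
      have hb := (hSieve k.toNat hkm).trans (pvPrimeChar k.toNat)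
      beta_reduce
      by_cases hP : Nat.Prime k.toNat
      · rw [if_pos (hb.mpr hP), if_pos hP]
      · rw [if_neg (fun hc => hP (hb.mp hc)), if_neg hP]
    · rw [PySem.List.pyRange_one 2 n, List.foldl_map, pvRefN]
      apply PySem.List.foldl_congr_mem
      intro acc k hk
      have : ((2 : Int) + k).toNat = 2 + k := by omega
      rw [this]

-- ===== VERDICT (by name: the statement is the Claim_ definition above) =====
theorem playMaria_spec : Claim_equal_playMaria := by
  intro n _
  unfold Spec_playMaria
  rw [pvA_eq, pvB_eq]
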